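-- pv_equiv track=rewrite | github.com/wyk18703232953/myResearch | codeComplex/data/filteredData/python/quadratic/python_quadratic_0642.py | core_algorithm
-- ===== SOURCE A (Python) =====
-- def core_algorithm(a):
--     a.sort()
--     n = len(a)
--     i = 0
--     ans = 0
--     while i < len(a):
--         if a[i]:
--             ans += 1
--             j = i + 1
--             while j < n:
--                 if a[j] % a[i] == 0:
--                     a[j] = 0
--                 j += 1
--         i += 1
--     return ans
-- ===== SOURCE B (Python) =====
-- def core_algorithm(a):
--     vals = {x for x in a if x}
--     ans = 0
--     for v in vals:
--         if v < 0 or not any(w < v and v % w == 0 for w in vals):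
--             ans += 1
--     return ans
-- ===== Notes on version B (the rewrite author's own statement) =====
-- stated objective: simpler
-- what changed: A sorts the list and runs a destructive sieve that zeroes every later multiple of each surviving entry; B drops the sort and the mutation and directly counts, over the set of distinct nonzero values, the values that no smaller value in the list divides (negative values are never divisible by a smaller one, so they always count).
import Mathlib
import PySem

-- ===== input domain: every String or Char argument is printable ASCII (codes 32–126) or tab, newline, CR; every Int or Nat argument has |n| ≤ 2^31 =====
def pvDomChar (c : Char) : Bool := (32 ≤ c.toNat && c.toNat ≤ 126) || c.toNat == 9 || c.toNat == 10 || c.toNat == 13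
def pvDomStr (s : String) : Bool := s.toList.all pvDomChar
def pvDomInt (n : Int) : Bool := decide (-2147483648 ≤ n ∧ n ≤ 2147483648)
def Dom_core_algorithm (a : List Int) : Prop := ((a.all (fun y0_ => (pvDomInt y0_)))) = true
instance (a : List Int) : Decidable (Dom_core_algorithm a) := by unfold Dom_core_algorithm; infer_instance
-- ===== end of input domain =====

-- B replaces A's sort + in-place "zero out the multiples" sieve by a direct count, over the set of
-- distinct nonzero values, of the values no smaller value divides (objective: simpler).
-- A sorts and mutates its argument in place; B does not — the equivalence proved here is about the
-- RETURN value only.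

-- ===== PORT A =====
-- inner while loop: 'j = i + 1; while j < n: if a[j] % a[i] == 0: a[j] = 0; j += 1'
def pvInnerA (p : Int) (n : Nat) (s : List Int) (j : Nat) : List Int :=
  if _h : j < n then
    pvInnerA p n (if PySem.Int.mod (s.getD j 0) p = 0 then s.set j 0 else s) (j + 1)
  else s
termination_by n - j

theorem pvInnerA_length (p : Int) (n : Nat) (s : List Int) (j : Nat) :
    (pvInnerA p n s j).length = s.length := by
  unfold pvInnerA
  split
  · rw [pvInnerA_length]
    split <;> simp
  · rfl
termination_by n - j

-- outer while loop: 'i = 0; ans = 0; while i < len(a): …'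
def pvOuterA (n : Nat) (s : List Int) (i : Nat) (ans : Int) : Int :=
  if _h : i < s.length then
    if s.getD i 0 ≠ 0 then
      pvOuterA n (pvInnerA (s.getD i 0) n s (i + 1)) (i + 1) (ans + 1)
    else
      pvOuterA n s (i + 1) ans
  else ans
termination_by s.length - i
decreasing_by
  · rw [pvInnerA_length]; omega
  · omega

def core_algorithm (a : List Int) : Int :=
  let s := PySem.List.sorted a (fun x => x) false   -- a.sort()
  pvOuterA s.length s 0 0

-- ===== PORT B =====
def core_algorithm_alt (a : List Int) : Int :=
  let vals : PySem.Set Int := PySem.Set.ofList (a.filter (fun x => x ≠ 0))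
  vals.foldl (fun ans v =>
    if v < 0 ∨ ¬ (vals.any (fun w => decide (w < v) && decide (PySem.Int.mod v w = 0))) = true
    then ans + 1 else ans) 0

-- ===== PRECONDITION & SPEC =====
def Spec_core_algorithm (a : List Int) (out : Int) : Prop := out = core_algorithm_alt a
instance (a : List Int) (out : Int) : Decidable (Spec_core_algorithm a out) := by unfold Spec_core_algorithm; infer_instance

-- ===== CLAIM (what is proved, stated in full; the proofs are below) =====
def Claim_equal_core_algorithm : Prop := ∀ (a : List Int), Dom_core_algorithm a → Spec_core_algorithm a (core_algorithm a)

-- ===== LEMMAS AND PROOFS =====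

-- index k of s survives A's sieve: nonzero and no earlier entry divides it
def pvGood (s : List Int) (k : Nat) : Bool :=
  s.getD k 0 != 0 && (List.range k).all (fun k' => !(decide (s.getD k' 0 ∣ s.getD k 0)))

theorem pvGood_iff (s : List Int) (k : Nat) :
    pvGood s k = true ↔ (s.getD k 0 ≠ 0 ∧ ∀ k' < k, ¬ (s.getD k' 0 ∣ s.getD k 0)) := by
  simp [pvGood, List.all_eq_true, List.mem_range]

-- "entry k has been zeroed by the time the outer index reaches i"
def pvZd (s0 : List Int) (i k : Nat) : Prop :=
  s0.getD k 0 = 0 ∨ ∃ k', k' < i ∧ k' < k ∧ s0.getD k' 0 ∣ s0.getD k 0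

-- value v is kept by B: nonzero, and no smaller element of a divides it
def pvKeep (a : List Int) (v : Int) : Bool :=
  v != 0 && a.all (fun w => !(decide (w < v) && decide (w ∣ v)))

theorem pvInnerA_getD (p : Int) (n : Nat) (s : List Int) (j : Nat) (hn : n ≤ s.length) (k : Nat) :
    (pvInnerA p n s j).getD k 0 =
      if j ≤ k ∧ k < n ∧ p ∣ s.getD k 0 then 0 else s.getD k 0 := by
  unfold pvInnerA
  split
  · next hjn =>
    rw [pvInnerA_getD p n _ (j+1) (by split <;> simpa) k]
    by_cases hm : PySem.Int.mod (s.getD j 0) p = 0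
    · simp only [if_pos hm]
      rw [PySem.Int.mod_eq_zero_iff_dvd] at hm
      by_cases hk : k = j
      · subst hk
        have hset : (s.set k 0).getD k 0 = 0 := by
          rw [List.getD_eq_getElem?_getD, List.getElem?_set_self']
          simp [show k < s.length by omega]
        simp only [hset]
        rw [if_neg (by omega), if_pos ⟨le_refl k, by omega, hm⟩]
      · have hset : (s.set j 0).getD k 0 = s.getD k 0 := by
          rw [List.getD_eq_getElem?_getD, List.getElem?_set_ne (by omega), ← List.getD_eq_getElem?_getD]
        simp only [hset]
        congr 1
        simp only [eq_iff_iff]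
        constructor <;> rintro ⟨h1, h2, h3⟩ <;> exact ⟨by omega, h2, h3⟩
    · simp only [if_neg hm]
      rw [PySem.Int.mod_eq_zero_iff_dvd] at hm
      congr 1
      simp only [eq_iff_iff]
      constructor <;> rintro ⟨h1, h2, h3⟩
      · exact ⟨by omega, h2, h3⟩
      · refine ⟨?_, h2, h3⟩
        rcases eq_or_lt_of_le h1 with rfl | hlt
        · exact absurd h3 hm
        · omega
  · next hjn =>
    rw [if_neg (by omega)]
termination_by n - j

theorem pvOuterA_eq_count (s0 : List Int) (i : Nat) (s : List Int) (ans : Int)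
    (hl : s.length = s0.length)
    (hinv : ∀ k, (pvZd s0 i k ∧ s.getD k 0 = 0) ∨ (¬ pvZd s0 i k ∧ s.getD k 0 = s0.getD k 0)) :
    pvOuterA s0.length s i ans
      = ans + (((List.range' i (s0.length - i)).countP (pvGood s0)) : Int) := by
  have hmono : ∀ k, pvZd s0 i k → pvZd s0 (i+1) k := by
    rintro k (h0 | ⟨k', h1, h2, h3⟩)
    · exact Or.inl h0
    · exact Or.inr ⟨k', by omega, h2, h3⟩
  unfold pvOuterA
  split
  · next hi =>
    have hii : i < s0.length := hl ▸ hi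
    have hrange : List.range' i (s0.length - i) = i :: List.range' (i+1) (s0.length - (i+1)) := by
      have h : s0.length - i = (s0.length - (i+1)) + 1 := by omega
      rw [h, List.range'_succ]
    rw [hrange, List.countP_cons]
    split
    · next hne =>
      rcases hinv i with ⟨_, h0⟩ | ⟨hnzd, heq⟩
      · exact absurd h0 hne
      have hgood : pvGood s0 i = true := by
        unfold pvZd at hnzd
        push_neg at hnzd
        rw [pvGood_iff]
        exact ⟨hnzd.1, fun k' hk' => hnzd.2 k' hk' hk'⟩
      rw [pvOuterA_eq_count s0 (i+1) _ (ans+1) (by rw [pvInnerA_length]; exact hl) ?_]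
      · rw [hgood]
        norm_num
        push_cast
        ring
      · intro k
        have hget := pvInnerA_getD (s.getD i 0) s0.length s (i+1) (le_of_eq hl.symm) k
        rcases hinv k with ⟨hzd, h0⟩ | ⟨hnzd', heq'⟩
        · refine Or.inl ⟨hmono k hzd, ?_⟩
          rw [hget, h0]
          split <;> rfl
        · by_cases hc : i + 1 ≤ k ∧ k < s0.length ∧ s0.getD i 0 ∣ s0.getD k 0
          · refine Or.inl ⟨Or.inr ⟨i, by omega, by omega, hc.2.2⟩, ?_⟩
            rw [hget, if_pos (by rw [heq, heq']; exact hc)]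
          · refine Or.inr ⟨?_, ?_⟩
            · rintro (h0 | ⟨k', hk1, hk2, hk3⟩)
              · exact hnzd' (Or.inl h0)
              · rcases Nat.lt_or_ge k' i with hlt | hge
                · exact hnzd' (Or.inr ⟨k', hlt, hk2, hk3⟩)
                · have hki : k' = i := by omega
                  subst hki
                  by_cases hklen : k < s0.length
                  · exact hc ⟨by omega, hklen, hk3⟩
                  · exact hnzd' (Or.inl (by rw [List.getD_eq_getElem?_getD, List.getElem?_eq_none (by omega)]; rfl))
            · rw [hget, if_neg (by rw [heq, heq']; exact hc), heq']
    · next hne =>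
      have hne0 : s.getD i 0 = 0 := by
        by_contra h
        exact hne h
      have hzdii : pvZd s0 i i := by
        rcases hinv i with ⟨h, _⟩ | ⟨hnzd, heq⟩
        · exact h
        · exact Or.inl (heq ▸ hne0)
      have hgood : pvGood s0 i = false := by
        rw [Bool.eq_false_iff, Ne, pvGood_iff]
        rintro ⟨hne', hall⟩
        rcases hzdii with h0 | ⟨k', h1, h2, h3⟩
        · exact hne' h0
        · exact hall k' h2 h3
      rw [pvOuterA_eq_count s0 (i+1) s ans hl ?_]
      · rw [hgood]
        simp only [Bool.false_eq_true, if_neg (by simp : ¬ (False : Prop))]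
        push_cast
        ring
      · intro k
        rcases hinv k with ⟨hzd, h0⟩ | ⟨hnzd', heq'⟩
        · exact Or.inl ⟨hmono k hzd, h0⟩
        · refine Or.inr ⟨?_, heq'⟩
          rintro (h0 | ⟨k', hk1, hk2, hk3⟩)
          · exact hnzd' (Or.inl h0)
          · rcases Nat.lt_or_ge k' i with hlt | hge
            · exact hnzd' (Or.inr ⟨k', hlt, hk2, hk3⟩)
            · have hki : k' = i := by omega
              subst hki
              rcases hzdii with h0' | ⟨k'', hk1', hk2', hk3'⟩
              · refine hnzd' (Or.inl (Int.zero_dvd.mp ?_))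
                have h := hk3
                rw [h0'] at h
                exact h
              · exact hnzd' (Or.inr ⟨k'', hk1', by omega, dvd_trans hk3' hk3⟩)
  · next hi =>
    have h0 : s0.length - i = 0 := by omega
    rw [h0]
    simp
termination_by s0.length - i

theorem core_algorithm_eq_count (a : List Int) :
    core_algorithm a
      = (((List.range (PySem.List.sorted a (fun x => x) false).length).countP
            (pvGood (PySem.List.sorted a (fun x => x) false))) : Int) := by
  unfold core_algorithm
  rw [pvOuterA_eq_count _ 0 _ 0 rfl ?_]
  · rw [Nat.sub_zero, ← List.range_eq_range', zero_add]
  · intro k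
    by_cases h : (PySem.List.sorted a (fun x => x) false).getD k 0 = 0
    · exact Or.inl ⟨Or.inl h, h⟩
    · refine Or.inr ⟨?_, rfl⟩
      rintro (h0 | ⟨k', hk, _, _⟩)
      · exact h h0
      · omega

theorem alt_eq_count (a : List Int) :
    core_algorithm_alt a
      = (((PySem.Set.ofList (a.filter (fun x => x ≠ 0))).countP
            (pvKeep a)) : Int) := by
  unfold core_algorithm_alt
  rw [PySem.List.foldl_ite_add_one, zero_add]
  congr 1
  refine List.countP_congr ?_
  intro v hv
  have hva : v ∈ a ∧ v ≠ 0 := by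
    have h := (PySem.Set.mem_ofList _ _).mp hv
    simpa [List.mem_filter] using h
  simp only [decide_eq_true_eq, pvKeep, Bool.and_eq_true, bne_iff_ne, ne_eq,
    List.all_eq_true, Bool.not_eq_true', Bool.and_eq_false_iff, List.any_eq_true,
    decide_eq_false_iff_not, PySem.Int.mod_eq_zero_iff_dvd, not_exists, not_and,
    decide_eq_false, eq_iff_iff]
  constructor
  · rintro (hvneg | hnone)
    · refine ⟨hva.2, fun w hw => ?_⟩
      rcases Decidable.em (w < v) with hlt | hnlt
      · right
        intro hdvd
        have hd : -w ∣ -v := neg_dvd.mpr (dvd_neg.mpr hdvd)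
        have := Int.le_of_dvd (by omega) hd
        omega
      · exact Or.inl (by simpa using hnlt)
    · refine ⟨hva.2, fun w hw => ?_⟩
      rcases Decidable.em (w < v) with hlt | hnlt
      · right
        intro hdvd
        have hw0 : w ≠ 0 := by
          rintro rfl
          exact hva.2 (Int.zero_dvd.mp hdvd)
        have hwmem : w ∈ PySem.Set.ofList (a.filter (fun x => decide ¬ x = 0)) := by
          rw [PySem.Set.mem_ofList, List.mem_filter]
          simp [hw, hw0]
        have := hnone w hwmem
        simp [hlt, hdvd] at this
      · exact Or.inl (by simpa using hnlt)
  · rintro ⟨hv0, hall⟩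
    right
    intro w hwmem
    have hwa : w ∈ a := by
      have h := (PySem.Set.mem_ofList _ _).mp hwmem
      exact (List.mem_filter.mp h).1
    rcases hall w hwa with h | h
    · simp [show ¬ w < v by simpa using h]
    · simp [h]

theorem pvKeep_iff (a : List Int) (v : Int) :
    pvKeep a v = true ↔ (v ≠ 0 ∧ ∀ w ∈ a, ¬ (w < v ∧ w ∣ v)) := by
  simp [pvKeep, List.all_eq_true]
  intro _
  constructor
  · intro h w hw hlt hd
    rcases h w hw with hle | hnd
    · omega
    · exact hnd hd
  · intro h w hw
    by_cases hlt : w < v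
    · exact Or.inr (h w hw hlt)
    · exact Or.inl (by omega)

theorem pvFirstOcc {v : Int} {l : List Int} (h : v ∈ l) :
    ∃ k, ∃ hk : k < l.length, l[k] = v ∧ ∀ k' (_ : k' < k), l[k']'(by omega) ≠ v := by
  induction l with
  | nil => exact absurd h (List.not_mem_nil)
  | cons x xs ih =>
    by_cases hx : x = v
    · exact ⟨0, by simp, hx, fun k' hk' => absurd hk' (by omega)⟩
    · have hv : v ∈ xs := by
        rcases List.mem_cons.mp h with rfl | hv
        · exact absurd rfl hx
        · exact hv
      obtain ⟨k, hk, h1, h2⟩ := ih hv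
      refine ⟨k + 1, by simpa using Nat.succ_lt_succ hk, by simpa using h1, ?_⟩
      intro k' hk'
      match k' with
      | 0 => simpa using hx
      | Nat.succ m =>
        have := h2 m (by omega)
        simpa using this

theorem count_bridge (a : List Int) :
    ((List.range (PySem.List.sorted a (fun x => x) false).length).countP
        (pvGood (PySem.List.sorted a (fun x => x) false)))
      = ((PySem.Set.ofList (a.filter (fun x => x ≠ 0))).countP
            (pvKeep a)) := by
  have hperm : (PySem.List.sorted a (fun x => x) false).Perm a := PySem.List.sorted_perm ..
  set s0 := PySem.List.sorted a (fun x => x) false with hs0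
  set vals := PySem.Set.ofList (a.filter (fun x => x ≠ 0)) with hvals
  have hmemv : ∀ w, w ∈ vals ↔ (w ∈ a ∧ w ≠ 0) := by
    intro w
    rw [hvals, PySem.Set.mem_ofList, List.mem_filter]
    simp
  have hL : (List.range s0.length).countP (pvGood s0)
      = ((List.range s0.length).toFinset.filter (fun k => pvGood s0 k = true)).card := by
    rw [List.countP_eq_length_filter, ← List.toFinset_card_of_nodup ((List.nodup_range).filter _),
      List.toFinset_filter]
  have hR : vals.countP (pvKeep a)
      = (vals.toFinset.filter (fun v => pvKeep a v = true)).card := by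
    rw [List.countP_eq_length_filter, ← List.toFinset_card_of_nodup ((PySem.Set.nodup_ofList _).filter _),
      List.toFinset_filter]
  rw [hL, hR]
  refine Finset.card_bij (fun k _ => s0.getD k 0) ?_ ?_ ?_
  · -- maps to
    intro k hk
    rw [Finset.mem_filter, List.mem_toFinset, List.mem_range] at hk
    obtain ⟨hkn, hg⟩ := hk
    rw [pvGood_iff] at hg
    have hget : s0.getD k 0 = s0[k] := List.getD_eq_getElem s0 0 hkn
    have hmem : s0.getD k 0 ∈ a := by
      rw [hget]
      exact hperm.mem_iff.mp (List.getElem_mem hkn)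
    rw [Finset.mem_filter, List.mem_toFinset, hmemv, pvKeep_iff]
    refine ⟨⟨hmem, hg.1⟩, hg.1, ?_⟩
    rintro w hw ⟨hlt, hdvd⟩
    have hws : w ∈ s0 := hperm.mem_iff.mpr hw
    obtain ⟨j, hj, hjw⟩ := List.mem_iff_getElem.mp hws
    rcases Nat.lt_or_ge j k with hjk | hjk
    · exact hg.2 j hjk (by rw [List.getD_eq_getElem s0 0 hj, hjw]; exact hdvd)
    · have hmono := PySem.List.sorted_id_getElem_mono a hjk hj
      have hwle : s0.getD k 0 ≤ w := by
        rw [hget]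
        calc s0[k] ≤ s0[j] := hmono
          _ = w := hjw
      have hlt' : w < s0.getD k 0 := hlt
      omega
  · -- injective
    intro k1 hk1 k2 hk2 heq
    have heq' : s0.getD k1 0 = s0.getD k2 0 := heq
    rw [Finset.mem_filter, List.mem_toFinset, List.mem_range] at hk1 hk2
    obtain ⟨hn1, hg1⟩ := hk1
    obtain ⟨hn2, hg2⟩ := hk2
    rw [pvGood_iff] at hg1 hg2
    by_contra hne
    rcases Nat.lt_or_ge k1 k2 with h | h
    · exact hg2.2 k1 h (dvd_of_eq heq')
    · exact hg1.2 k2 (by omega) (dvd_of_eq heq'.symm)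
  · -- surjective
    intro v hv
    rw [Finset.mem_filter, List.mem_toFinset, hmemv, pvKeep_iff] at hv
    obtain ⟨⟨hva, hv0⟩, _, hall⟩ := hv
    have hvs : v ∈ s0 := hperm.mem_iff.mpr hva
    obtain ⟨k, hk, h1, h2⟩ := pvFirstOcc hvs
    refine ⟨k, ?_, ?_⟩
    · rw [Finset.mem_filter, List.mem_toFinset, List.mem_range, pvGood_iff]
      refine ⟨hk, by rw [List.getD_eq_getElem s0 0 hk, h1]; exact hv0, ?_⟩
      intro k' hk' hdvd
      have hk'n : k' < s0.length := by omega
      have hw : s0.getD k' 0 ∈ a := by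
        rw [List.getD_eq_getElem s0 0 hk'n]
        exact hperm.mem_iff.mp (List.getElem_mem hk'n)
      have h1' : s0.getD k 0 = v := by
        rw [List.getD_eq_getElem s0 0 hk]
        exact h1
      have hle : s0.getD k' 0 ≤ s0.getD k 0 := by
        rw [List.getD_eq_getElem s0 0 hk'n, List.getD_eq_getElem s0 0 hk]
        exact PySem.List.sorted_id_getElem_mono a (le_of_lt hk') hk
      have hne : s0.getD k' 0 ≠ v := by
        rw [List.getD_eq_getElem s0 0 hk'n]
        exact h2 k' hk'
      refine hall (s0.getD k' 0) hw ⟨by omega, ?_⟩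
      rw [← h1']
      exact hdvd
    · show s0.getD k 0 = v
      rw [List.getD_eq_getElem s0 0 hk, h1]

-- ===== VERDICT (by name: the statement is the Claim_ definition above) =====
theorem core_algorithm_spec : Claim_equal_core_algorithm := by
  intro a _
  unfold Spec_core_algorithm
  rw [core_algorithm_eq_count, alt_eq_count, count_bridge]
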